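-- pv_equiv track=rewrite | github.com/pypi-data/pypi-mirror-64 | packages/rantanplan/rantanplan-0.4.3.tar.gz/rantanplan-0.4.3/src/rantanplan/rhymes.py | assign_letter_codes
-- ===== SOURCE A (Python) =====
-- def assign_letter_codes(codes, code_numbers, unrhymed_verses, offset=None):
--     """Adjust for unrhymed verses and assign letter codes.
--     By default, all verses are checked, that means that a poem might match
--     lines 1 and 100 if the ending is the same. To control how many lines
--     should a matching rhyme occur in, an offset can be set to an arbitrary
--     number, effectively allowing rhymes that only occur between
--     lines i and i + offset."""
--     letters = {}
--     rhymes = []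
--     endings = []
--     last_found = {}
--     for index, rhyme in enumerate(code_numbers):
--         if rhyme in unrhymed_verses:
--             rhyme_letter = -1  # unrhymed verse
--             endings.append('')  # do not track unrhymed verse endings
--         else:
--             if rhyme not in letters:
--                 letters[rhyme] = len(letters)
--             rhyme_letter = letters[rhyme]
--             # Reassign unrhymed verses if an offset is set
--             if (rhyme in last_found
--                     and offset is not None
--                     and index - last_found[rhyme] > offset):
--                 rhymes[last_found[rhyme]] = -1  # unrhymed verse
--                 endings[last_found[rhyme]] = ''  # unrhymed verse ending
--             last_found[rhyme] = index
--             endings.append(codes[rhyme])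
--         rhymes.append(rhyme_letter)
--     return rhymes, endings
-- ===== SOURCE B (Python) =====
-- def assign_letter_codes(codes, code_numbers, unrhymed_verses, offset=None):
--     """Assign letter codes by looking AHEAD for the next occurrence of each
--     rhyme instead of back-patching already emitted entries."""
--     n = len(code_numbers)
--     seen = []
--     rhymes = []
--     endings = []
--     for index, rhyme in enumerate(code_numbers):
--         if rhyme in unrhymed_verses:
--             rhymes.append(-1)
--             endings.append('')
--             continue
--         if rhyme not in seen:
--             seen.append(rhyme)
--         nxt = None
--         for j in range(index + 1, n):
--             if code_numbers[j] == rhyme: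
--                 nxt = j
--                 break
--         if offset is not None and nxt is not None and nxt - index > offset:
--             rhymes.append(-1)
--             endings.append('')
--         else:
--             rhymes.append(seen.index(rhyme))
--             endings.append(codes[rhyme])
--     return rhymes, endings
-- ===== Notes on version B (the rewrite author's own statement) =====
-- stated objective: alternative
-- what changed: Replaces A's stateful back-patching (letters/last_found dicts plus in-place resets of already-emitted entries) by a pointwise look-ahead: each verse scans forward for the next occurrence of its rhyme and decides its own letter/ending immediately, so no emitted entry is ever mutated.
import Mathlib
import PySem

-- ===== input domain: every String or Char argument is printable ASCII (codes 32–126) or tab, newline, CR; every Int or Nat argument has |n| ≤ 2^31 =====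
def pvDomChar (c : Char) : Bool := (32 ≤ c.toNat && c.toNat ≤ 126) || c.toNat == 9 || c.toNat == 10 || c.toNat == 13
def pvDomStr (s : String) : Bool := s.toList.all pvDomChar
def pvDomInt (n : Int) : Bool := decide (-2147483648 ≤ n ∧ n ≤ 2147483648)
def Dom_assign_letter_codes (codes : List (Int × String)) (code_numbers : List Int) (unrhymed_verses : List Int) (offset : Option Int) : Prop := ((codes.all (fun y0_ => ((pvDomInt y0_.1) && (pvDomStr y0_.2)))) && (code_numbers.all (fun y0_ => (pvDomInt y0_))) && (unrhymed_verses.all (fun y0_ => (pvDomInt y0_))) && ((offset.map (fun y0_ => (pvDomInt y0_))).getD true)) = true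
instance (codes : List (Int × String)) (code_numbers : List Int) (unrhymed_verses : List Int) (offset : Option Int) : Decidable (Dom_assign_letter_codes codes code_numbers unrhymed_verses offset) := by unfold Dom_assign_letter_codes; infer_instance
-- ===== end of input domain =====

-- B replaces A's back-patching of already-emitted entries (via letters/last_found state) by a
-- pointwise look-ahead for the next occurrence of each rhyme; same return value, different traversal.

-- ===== PORT A =====
-- codes[rhyme]: first-match lookup in the association list (Python dict access).
-- Total via default "": exact on Pre_ (the key is present there; Python raises KeyError otherwise).
def alcLookup (codes : List (Int × String)) (rhyme : Int) : String :=
  (PySem.Dict.mk codes).getD rhyme ""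

-- one iteration of A's loop body; state = (letters, rhymes, endings, last_found)
def alcStepA (codes : List (Int × String)) (unrhymed_verses : List Int) (offset : Option Int)
    (s : PySem.Dict Int Int × List Int × List String × PySem.Dict Int Int) (p : Int × Int) :
    PySem.Dict Int Int × List Int × List String × PySem.Dict Int Int :=
  let letters := s.1
  let rhymes := s.2.1
  let endings := s.2.2.1
  let last_found := s.2.2.2
  let index := p.1
  let rhyme := p.2
  if unrhymed_verses.contains rhyme then
    (letters, rhymes ++ [(-1 : Int)], endings ++ [""], last_found)
  else
    let letters' := if letters.contains rhyme then letters else letters.insert rhyme (letters.size : Int)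
    let rhyme_letter := letters'.getD rhyme 0
    let doReset := last_found.contains rhyme && offset.isSome &&
      decide (index - last_found.getD rhyme 0 > offset.getD 0)
    let rhymes' := if doReset then PySem.List.pySetD rhymes (last_found.getD rhyme 0) (-1) else rhymes
    let endings' := if doReset then PySem.List.pySetD endings (last_found.getD rhyme 0) "" else endings
    (letters', rhymes' ++ [rhyme_letter], endings' ++ [alcLookup codes rhyme], last_found.insert rhyme index)

def assign_letter_codes (codes : List (Int × String)) (code_numbers : List Int) (unrhymed_verses : List Int) (offset : Option Int) : List Int × List String :=
  let s := (PySem.List.enumerate code_numbers 0).foldl (alcStepA codes unrhymed_verses offset)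
    (PySem.Dict.empty, [], [], PySem.Dict.empty)
  (s.2.1, s.2.2.1)

-- ===== PORT B =====
-- first j in range(index+1, n) with code_numbers[j] == rhyme (B's inner scan with break)
def alcNextB (code_numbers : List Int) (index : Int) (rhyme : Int) : Option Int :=
  (PySem.List.pyRange (index + 1) (code_numbers.length : Int) 1).find?
    (fun j => PySem.List.pyGetD code_numbers j 0 == rhyme)

-- one iteration of B's loop body; state = (seen, rhymes, endings)
def alcStepB (codes : List (Int × String)) (code_numbers : List Int) (unrhymed_verses : List Int)
    (offset : Option Int) (s : List Int × List Int × List String) (p : Int × Int) :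
    List Int × List Int × List String :=
  let seen := s.1
  let rhymes := s.2.1
  let endings := s.2.2
  let index := p.1
  let rhyme := p.2
  if unrhymed_verses.contains rhyme then
    (seen, rhymes ++ [(-1 : Int)], endings ++ [""])
  else
    let seen' := PySem.Set.add seen rhyme
    let nxt := alcNextB code_numbers index rhyme
    if offset.isSome && nxt.isSome && decide (nxt.getD 0 - index > offset.getD 0) then
      (seen', rhymes ++ [(-1 : Int)], endings ++ [""])
    else
      (seen', rhymes ++ [(((PySem.List.index? seen' rhyme).getD 0 : Nat) : Int)],
       endings ++ [alcLookup codes rhyme])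

def assign_letter_codes_alt (codes : List (Int × String)) (code_numbers : List Int) (unrhymed_verses : List Int) (offset : Option Int) : List Int × List String :=
  let s := (PySem.List.enumerate code_numbers 0).foldl
    (alcStepB codes code_numbers unrhymed_verses offset) ([], [], [])
  (s.2.1, s.2.2)

-- ===== PRECONDITION & SPEC =====
-- Pre_ excludes exactly the inputs where Python A raises KeyError: some non-unrhymed code
-- number has no entry in codes (B raises KeyError there too, possibly at a later index).
def Pre_assign_letter_codes (codes : List (Int × String)) (code_numbers : List Int) (unrhymed_verses : List Int) (offset : Option Int) : Prop :=
  ∀ r ∈ code_numbers, unrhymed_verses.contains r = false → r ∈ codes.map Prod.fst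
instance (codes : List (Int × String)) (code_numbers : List Int) (unrhymed_verses : List Int) (offset : Option Int) : Decidable (Pre_assign_letter_codes codes code_numbers unrhymed_verses offset) := by unfold Pre_assign_letter_codes; infer_instance

def pvWitness_assign_letter_codes : (List (Int × String)) × List Int × List Int × Option Int :=
  ([(1, "a"), (2, "b")], [1, 2, 1, 3], [3], some 1)

def Spec_assign_letter_codes (codes : List (Int × String)) (code_numbers : List Int) (unrhymed_verses : List Int) (offset : Option Int) (out : List Int × List String) : Prop := out = assign_letter_codes_alt codes code_numbers unrhymed_verses offset
instance (codes : List (Int × String)) (code_numbers : List Int) (unrhymed_verses : List Int) (offset : Option Int) (out : List Int × List String) : Decidable (Spec_assign_letter_codes codes code_numbers unrhymed_verses offset out) := by unfold Spec_assign_letter_codes; infer_instance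

-- ===== CLAIM (what is proved, stated in full; the proofs are below) =====
def Claim_equal_assign_letter_codes : Prop := ∀ (codes : List (Int × String)) (code_numbers : List Int) (unrhymed_verses : List Int) (offset : Option Int), Dom_assign_letter_codes codes code_numbers unrhymed_verses offset → Pre_assign_letter_codes codes code_numbers unrhymed_verses offset → Spec_assign_letter_codes codes code_numbers unrhymed_verses offset (assign_letter_codes codes code_numbers unrhymed_verses offset)

-- ===== LEMMAS AND PROOFS =====
-- Common characterisation: alcVal codes nums U off k i is the (rhyme-letter, ending) pair of
-- verse i when only occurrences before index k are taken into account; both loops are shown to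
-- produce (range n).map (alcVal ... n).
def alcSeenStep (U : List Int) (s : List Int) (r : Int) : List Int :=
  if U.contains r then s else PySem.Set.add s r
def alcSeen (U p : List Int) : List Int := p.foldl (alcSeenStep U) []
def alcNxt (nums : List Int) (k i : Nat) : Option Nat :=
  (List.range k).find? (fun j => decide (i < j) && (nums.getD j 0 == nums.getD i 0))
def alcVal (codes : List (Int × String)) (nums U : List Int) (off : Option Int) (k i : Nat) : Int × String :=
  let r := nums.getD i 0
  if U.contains r then (-1, "")
  else if off.isSome && (alcNxt nums k i).isSome &&
      decide ((((alcNxt nums k i).getD 0 : Nat) : Int) - (i : Int) > off.getD 0) then (-1, "")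
  else ((((PySem.List.index? (alcSeen U nums) r).getD 0 : Nat) : Int), alcLookup codes r)

-- seen grows by appending
lemma alcSeen_foldl_append (U : List Int) (q : List Int) :
    ∀ acc, ∃ t, q.foldl (alcSeenStep U) acc = acc ++ t := by
  induction q with
  | nil => exact fun acc => ⟨[], by simp⟩
  | cons r q ih =>
    intro acc
    obtain ⟨t, ht⟩ := ih (alcSeenStep U acc r)
    simp only [List.foldl_cons, ht]
    unfold alcSeenStep PySem.Set.add
    split
    · exact ⟨t, rfl⟩
    · split
      · exact ⟨t, rfl⟩
      · exact ⟨[r] ++ t, by simp⟩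

lemma alcSeen_append (U p q : List Int) :
    alcSeen U (p ++ q) = q.foldl (alcSeenStep U) (alcSeen U p) := by
  simp [alcSeen, List.foldl_append]

lemma alcSeen_prefix (U p q : List Int) :
    ∃ t, alcSeen U (p ++ q) = alcSeen U p ++ t := by
  rw [alcSeen_append]; exact alcSeen_foldl_append U q _

lemma alcSeen_snoc (U p : List Int) (r : Int) :
    alcSeen U (p ++ [r]) = alcSeenStep U (alcSeen U p) r := by
  simp [alcSeen_append]

-- index? stable under suffix, for members
lemma index_stable (U p q : List Int) (r : Int) (h : r ∈ alcSeen U p) :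
    PySem.List.index? (alcSeen U (p ++ q)) r = PySem.List.index? (alcSeen U p) r := by
  obtain ⟨t, ht⟩ := alcSeen_prefix U p q
  rw [ht, PySem.List.index?_append_of_mem t h]

-- set a mapped range
lemma set_map_range {α : Type} (k j : Nat) (f : Nat → α) (x : α) (hj : j < k) :
    ((List.range k).map f).set j x = (List.range k).map (fun i => if i = j then x else f i) := by
  apply List.ext_getElem
  · simp
  · intro i h1 h2
    simp only [List.length_set, List.length_map, List.length_range] at h1
    rw [List.getElem_set]
    simp only [List.getElem_map, List.getElem_range]
    split <;> simp_all [eq_comm]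

-- alcNxt recurrences
lemma alcNxt_succ (nums : List Int) (k i : Nat) :
    alcNxt nums (k + 1) i =
      (alcNxt nums k i).or (if decide (i < k) && (nums.getD k 0 == nums.getD i 0) then some k else none) := by
  unfold alcNxt
  rw [List.range_succ, List.find?_append]
  congr 1
  simp [List.find?]
  split <;> simp_all

lemma alcNxt_none_of_ge (nums : List Int) (k i : Nat) (h : k ≤ i + 1) :
    alcNxt nums k i = none := by
  unfold alcNxt
  rw [List.find?_eq_none]
  intro j hj
  simp only [List.mem_range] at hj
  simp only [Bool.and_eq_true, decide_eq_true_eq, beq_iff_eq, not_and]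
  omega

lemma alcNxt_isSome (nums : List Int) (k i j : Nat) (hij : i < j) (hjk : j < k)
    (hv : nums.getD j 0 = nums.getD i 0) : (alcNxt nums k i).isSome := by
  unfold alcNxt
  rw [List.find?_isSome]
  refine ⟨j, by simp [hjk], ?_⟩
  simp only [Bool.and_eq_true, decide_eq_true_eq, beq_iff_eq]
  exact ⟨hij, hv⟩

lemma alcNxt_none_iff (nums : List Int) (k i : Nat) :
    alcNxt nums k i = none ↔ ∀ j, i < j → j < k → nums.getD j 0 ≠ nums.getD i 0 := by
  unfold alcNxt
  rw [List.find?_eq_none]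
  constructor
  · intro h j h1 h2
    have := h j (by simp [h2])
    simp only [Bool.and_eq_true, decide_eq_true_eq, beq_iff_eq, not_and] at this
    exact this h1
  · intro h j hj
    simp only [List.mem_range] at hj
    simp only [Bool.and_eq_true, decide_eq_true_eq, beq_iff_eq, not_and]
    intro h1
    exact h j h1 hj

-- alcVal step lemmas
lemma alcVal_succ_of_ne (codes : List (Int × String)) (nums U : List Int) (off : Option Int)
    (k i : Nat) (hne : nums.getD k 0 ≠ nums.getD i 0) :
    alcVal codes nums U off (k + 1) i = alcVal codes nums U off k i := by
  unfold alcVal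
  rw [alcNxt_succ]
  simp only [List.getD_eq_getElem?_getD] at hne
  simp [hne]

lemma alcVal_succ_of_some (codes : List (Int × String)) (nums U : List Int) (off : Option Int)
    (k i : Nat) (hsome : (alcNxt nums k i).isSome = true) :
    alcVal codes nums U off (k + 1) i = alcVal codes nums U off k i := by
  unfold alcVal
  rw [alcNxt_succ]
  obtain ⟨j, hj⟩ := Option.isSome_iff_exists.mp hsome
  simp [hj]

lemma alcVal_self (codes : List (Int × String)) (nums U : List Int) (off : Option Int) (k : Nat) :
    alcVal codes nums U off (k + 1) k =
      if U.contains (nums.getD k 0) then (-1, "")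
      else ((((PySem.List.index? (alcSeen U nums) (nums.getD k 0)).getD 0 : Nat) : Int),
        alcLookup codes (nums.getD k 0)) := by
  unfold alcVal
  rw [alcNxt_none_of_ge nums (k + 1) k (by omega)]
  simp

lemma alcVal_of_none (codes : List (Int × String)) (nums U : List Int) (off : Option Int)
    (k i : Nat) (hnone : alcNxt nums k i = none) :
    alcVal codes nums U off k i =
      if U.contains (nums.getD i 0) then (-1, "")
      else ((((PySem.List.index? (alcSeen U nums) (nums.getD i 0)).getD 0 : Nat) : Int),
        alcLookup codes (nums.getD i 0)) := by
  unfold alcVal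
  rw [hnone]
  simp

lemma alcVal_succ_flip (codes : List (Int × String)) (nums U : List Int) (off : Option Int)
    (k i : Nat) (hik : i < k) (heq : nums.getD k 0 = nums.getD i 0)
    (hnone : alcNxt nums k i = none) :
    alcVal codes nums U off (k + 1) i =
      if U.contains (nums.getD i 0) then (-1, "")
      else if off.isSome && decide ((k : Int) - (i : Int) > off.getD 0) then (-1, "")
      else ((((PySem.List.index? (alcSeen U nums) (nums.getD i 0)).getD 0 : Nat) : Int),
        alcLookup codes (nums.getD i 0)) := by
  unfold alcVal
  rw [alcNxt_succ, hnone]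
  simp only [List.getD_eq_getElem?_getD] at heq
  simp [hik, heq]
lemma alcNextB_eq (nums : List Int) (k : Nat) (r : Int) (hr : nums.getD k 0 = r) :
    alcNextB nums (k : Int) r = (alcNxt nums nums.length k).map (fun j : Nat => (j : Int)) := by
  by_cases hkn : k + 1 ≤ nums.length
  · -- split range nums.length = range (k+1) ++ shifted range m
    have hm : nums.length = (k + 1) + (nums.length - (k + 1)) := by omega
    unfold alcNextB alcNxt
    rw [PySem.List.pyRange_one]
    have ht : ((nums.length : Int) - ((k : Int) + 1)).toNat = nums.length - (k + 1) := by omega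
    rw [ht]
    conv_rhs => rw [hm, List.range_add]
    rw [List.find?_append]
    have h1 : (List.range (k + 1)).find?
        (fun j => decide (k < j) && (nums.getD j 0 == nums.getD k 0)) = none := by
      rw [List.find?_eq_none]
      intro j hj
      simp only [List.mem_range] at hj
      simp only [Bool.and_eq_true, decide_eq_true_eq, not_and]
      omega
    rw [h1, Option.none_or, List.find?_map, List.find?_map, Option.map_map]
    have hp : ((fun j => decide (k < j) && (nums.getD j 0 == nums.getD k 0)) ∘ (fun t => k + 1 + t))
        = ((fun j => PySem.List.pyGetD nums j 0 == r) ∘ fun t : Nat => (k : Int) + 1 + (t : Int)) := by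
      funext t
      simp only [Function.comp_apply]
      have : ((k : Int) + 1 + (t : Int)) = ((k + 1 + t : Nat) : Int) := by push_cast; ring
      rw [this, PySem.List.pyGetD_natCast, hr]
      have hlt : k < k + 1 + t := by omega
      simp [hlt, List.getD]
    rw [hp]
    congr 1
  · unfold alcNextB
    rw [PySem.List.pyRange_one_eq_nil (by push_cast; omega), List.find?_nil,
      alcNxt_none_of_ge nums nums.length k (by omega), Option.map_none]

lemma getD_append_cons (p q : List Int) (r : Int) : (p ++ r :: q).getD p.length 0 = r := by
  simp [List.getD, List.getElem?_append_right (le_refl p.length)]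
lemma B_loop (codes : List (Int × String)) (U : List Int) (off : Option Int) (nums : List Int) :
    ∀ (rest p : List Int), nums = p ++ rest →
    ((PySem.List.enumerate rest (p.length : Int)).foldl (alcStepB codes nums U off)
       (alcSeen U p,
        (List.range p.length).map (fun i => (alcVal codes nums U off nums.length i).1),
        (List.range p.length).map (fun i => (alcVal codes nums U off nums.length i).2)))
    = (alcSeen U nums,
       (List.range nums.length).map (fun i => (alcVal codes nums U off nums.length i).1),
       (List.range nums.length).map (fun i => (alcVal codes nums U off nums.length i).2)) := by
  intro rest
  induction rest with
  | nil =>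
    intro p hp
    simp only [List.append_nil] at hp
    subst hp
    simp [PySem.List.enumerate]
  | cons r rest ih =>
    intro p hp
    have hk : nums.getD p.length 0 = r := by rw [hp]; exact getD_append_cons p rest r
    simp only [PySem.List.enumerate, List.foldl_cons]
    have hstep : alcStepB codes nums U off
        (alcSeen U p,
         (List.range p.length).map (fun i => (alcVal codes nums U off nums.length i).1),
         (List.range p.length).map (fun i => (alcVal codes nums U off nums.length i).2))
        ((p.length : Int), r)
        = (alcSeen U (p ++ [r]),
           (List.range (p.length + 1)).map (fun i => (alcVal codes nums U off nums.length i).1),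
           (List.range (p.length + 1)).map (fun i => (alcVal codes nums U off nums.length i).2)) := by
      rw [List.range_succ, List.map_append, List.map_append, alcSeen_snoc]
      simp only [List.map_cons, List.map_nil]
      by_cases hU : r ∈ U
      · have hval : alcVal codes nums U off nums.length p.length = (-1, "") := by
          unfold alcVal
          rw [hk]
          simp [hU]
        rw [hval]
        unfold alcStepB alcSeenStep
        simp [hU, List.contains_eq_mem]
      · have hseen : r ∈ PySem.Set.add (alcSeen U p) r := by
          unfold PySem.Set.add
          split <;> simp_all [List.contains_eq_mem]
        have h1 : alcSeenStep U (alcSeen U p) r = PySem.Set.add (alcSeen U p) r := by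
          unfold alcSeenStep
          simp [hU, List.contains_eq_mem]
        have hidx : PySem.List.index? (alcSeen U nums) r
            = PySem.List.index? (PySem.Set.add (alcSeen U p) r) r := by
          have hps : nums = (p ++ [r]) ++ rest := by rw [hp]; simp
          rw [hps, index_stable U (p ++ [r]) rest r (by rw [alcSeen_snoc, h1]; exact hseen),
            alcSeen_snoc, h1]
        have hnext := alcNextB_eq nums p.length r hk
        have hval : alcVal codes nums U off nums.length p.length
            = (if off.isSome && (alcNextB nums ((p.length : Nat) : Int) r).isSome &&
                  decide ((alcNextB nums ((p.length : Nat) : Int) r).getD 0 - ((p.length : Nat) : Int) > off.getD 0)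
               then ((-1 : Int), "")
               else ((((PySem.List.index? (PySem.Set.add (alcSeen U p) r) r).getD 0 : Nat) : Int),
                 alcLookup codes r)) := by
          unfold alcVal
          rw [hk, hnext, ← hidx]
          have hUb : U.contains r = false := by simp [List.contains_eq_mem, hU]
          simp only [hUb, Bool.false_eq_true, if_false]
          cases hnx : alcNxt nums nums.length p.length with
          | none => simp
          | some j => simp
        rw [hval, h1]
        unfold alcStepB
        have hUb : U.contains r = false := by simp [List.contains_eq_mem, hU]
        simp only [hUb, Bool.false_eq_true, if_false]
        split <;> simp_all
    rw [hstep]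
    have hp2 : nums = (p ++ [r]) ++ rest := by rw [hp]; simp
    have hcast : ((p.length : Int) + 1) = (((p ++ [r]).length : Nat) : Int) := by
      simp
    rw [hcast]
    have hlen1 : p.length + 1 = (p ++ [r]).length := by simp
    rw [hlen1]
    exact ih (p ++ [r]) hp2
def LettersInvA (U nums p : List Int) (letters : PySem.Dict Int Int) : Prop :=
  (∀ r : Int, letters.contains r = true ↔ r ∈ alcSeen U p)
  ∧ letters.size = (alcSeen U p).length
  ∧ (∀ r ∈ alcSeen U p, letters.getD r 0 = (((PySem.List.index? (alcSeen U p) r).getD 0 : Nat) : Int))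

def LastInvA (U nums : List Int) (last : PySem.Dict Int Int) (k : Nat) : Prop :=
  ∀ r : Int, r ∉ U →
    ((∀ j : Int, last.get? r = some j →
        ∃ jn : Nat, j = (jn : Int) ∧ jn < k ∧ nums.getD jn 0 = r ∧
          ∀ m : Nat, jn < m → m < k → nums.getD m 0 ≠ r)
     ∧ (last.get? r = none → ∀ m : Nat, m < k → nums.getD m 0 ≠ r))

lemma alcVal_unr (codes : List (Int × String)) (nums U : List Int) (off : Option Int)
    (k i : Nat) (hU : nums.getD i 0 ∈ U) : alcVal codes nums U off k i = (-1, "") := by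
  unfold alcVal
  simp only [List.getD_eq_getElem?_getD] at hU
  simp [hU]

lemma mem_add_self (s : List Int) (r : Int) : r ∈ PySem.Set.add s r := by
  unfold PySem.Set.add
  split <;> simp_all [List.contains_eq_mem]

lemma lettersInv_update (U nums p : List Int) (r : Int) (letters : PySem.Dict Int Int)
    (hU : r ∉ U) (hInv : LettersInvA U nums p letters) :
    LettersInvA U nums (p ++ [r])
      (if letters.contains r then letters else letters.insert r (letters.size : Int)) := by
  obtain ⟨hc, hs, hg⟩ := hInv
  have hsnoc : alcSeen U (p ++ [r]) = PySem.Set.add (alcSeen U p) r := by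
    rw [alcSeen_snoc]; unfold alcSeenStep; simp [hU]
  by_cases hcr : letters.contains r
  · -- r already seen: seen unchanged
    have hmem : r ∈ alcSeen U p := (hc r).mp hcr
    have hadd : PySem.Set.add (alcSeen U p) r = alcSeen U p := by
      unfold PySem.Set.add
      simp [List.contains_eq_mem, hmem]
    rw [if_pos hcr]
    unfold LettersInvA
    rw [hsnoc, hadd]
    exact ⟨hc, hs, hg⟩
  · have hmem : r ∉ alcSeen U p := fun h => hcr ((hc r).mpr h)
    have hadd : PySem.Set.add (alcSeen U p) r = alcSeen U p ++ [r] := by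
      unfold PySem.Set.add
      simp [List.contains_eq_mem, hmem]
    rw [if_neg hcr]
    unfold LettersInvA
    rw [hsnoc, hadd]
    refine ⟨?_, ?_, ?_⟩
    · intro r'
      rw [PySem.Dict.contains_insert]
      constructor
      · intro h
        rcases Bool.or_eq_true_iff.mp h with h | h
        · simp only [beq_iff_eq] at h; subst h; simp
        · exact List.mem_append.mpr (Or.inl ((hc r').mp h))
      · intro h
        rcases List.mem_append.mp h with h | h
        · exact Bool.or_eq_true_iff.mpr (Or.inr ((hc r').mpr h))
        · simp only [List.mem_singleton] at h; subst h; simp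
    · rw [PySem.Dict.size_insert]
      have hf : letters.contains r = false := by simpa using hcr
      simp [hf, hs]
    · intro r' hr'
      rcases List.mem_append.mp hr' with h | h
      · have hne : r' ≠ r := fun he => hmem (he ▸ h)
        rw [PySem.Dict.getD_insert_of_ne _ _ _ hne, hg r' h,
          PySem.List.index?_append_of_mem [r] h]
      · simp only [List.mem_singleton] at h; subst h
        rw [PySem.Dict.getD_insert_self, hs,
          PySem.List.index?_append_singleton_self _ _ hmem]
        simp

lemma lastInv_extend (U nums : List Int) (last : PySem.Dict Int Int) (k : Nat)
    (hInv : LastInvA U nums last k) (hnew : nums.getD k 0 ∈ U) :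
    LastInvA U nums last (k + 1) := by
  intro r' hr'
  obtain ⟨h1, h2⟩ := hInv r' hr'
  have hne : ∀ m : Nat, m < k + 1 → m < k ∨ nums.getD m 0 ≠ r' := by
    intro m hm
    by_cases h : m < k
    · exact Or.inl h
    · right
      have : m = k := by omega
      subst this
      intro he
      exact hr' (he ▸ hnew)
  refine ⟨?_, ?_⟩
  · intro j hj
    obtain ⟨jn, he, hlt, hv, hmax⟩ := h1 j hj
    refine ⟨jn, he, by omega, hv, ?_⟩
    intro m hm1 hm2
    rcases hne m hm2 with h | h
    · exact hmax m hm1 h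
    · exact h
  · intro hn m hm
    rcases hne m hm with h | h
    · exact h2 hn m h
    · exact h

lemma lastInv_insert (U nums : List Int) (last : PySem.Dict Int Int) (k : Nat) (r : Int)
    (hInv : LastInvA U nums last k) (hk : nums.getD k 0 = r) (hU : r ∉ U) :
    LastInvA U nums (last.insert r (k : Int)) (k + 1) := by
  intro r' hr'
  by_cases hrr : r' = r
  · subst hrr
    refine ⟨?_, ?_⟩
    · intro j hj
      rw [PySem.Dict.get?_insert_self] at hj
      refine ⟨k, by simpa using hj.symm, by omega, hk, by omega⟩
    · intro hn
      rw [PySem.Dict.get?_insert_self] at hn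
      exact absurd hn (by simp)
  · obtain ⟨h1, h2⟩ := hInv r' hr'
    have hget : (last.insert r (k : Int)).get? r' = last.get? r' :=
      PySem.Dict.get?_insert_of_ne _ _ hrr
    have hne : ∀ m : Nat, m < k + 1 → m < k ∨ nums.getD m 0 ≠ r' := by
      intro m hm
      by_cases h : m < k
      · exact Or.inl h
      · right
        have : m = k := by omega
        subst this
        rw [hk]
        exact fun he => hrr he.symm
    refine ⟨?_, ?_⟩
    · intro j hj
      rw [hget] at hj
      obtain ⟨jn, he, hlt, hv, hmax⟩ := h1 j hj
      refine ⟨jn, he, by omega, hv, ?_⟩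
      intro m hm1 hm2
      rcases hne m hm2 with h | h
      · exact hmax m hm1 h
      · exact h
    · intro hn m hm
      rw [hget] at hn
      rcases hne m hm with h | h
      · exact h2 hn m h
      · exact h

lemma A_loop (codes : List (Int × String)) (U : List Int) (off : Option Int) (nums : List Int) :
    ∀ (rest p : List Int) (letters last : PySem.Dict Int Int),
    nums = p ++ rest →
    LettersInvA U nums p letters →
    LastInvA U nums last p.length →
    ∃ l2 d2,
      (PySem.List.enumerate rest (p.length : Int)).foldl (alcStepA codes U off)
        (letters,
         (List.range p.length).map (fun i => (alcVal codes nums U off p.length i).1),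
         (List.range p.length).map (fun i => (alcVal codes nums U off p.length i).2),
         last)
      = (l2,
         (List.range nums.length).map (fun i => (alcVal codes nums U off nums.length i).1),
         (List.range nums.length).map (fun i => (alcVal codes nums U off nums.length i).2),
         d2) := by
  intro rest
  induction rest with
  | nil =>
    intro p letters last hp _ _
    simp only [List.append_nil] at hp
    subst hp
    exact ⟨letters, last, by simp [PySem.List.enumerate]⟩
  | cons r rest ih =>
    intro p letters last hp hLet hLast
    have hk : nums.getD p.length 0 = r := by rw [hp]; exact getD_append_cons p rest r
    have hlen : p.length < nums.length := by rw [hp]; simp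
    have hp2 : nums = (p ++ [r]) ++ rest := by rw [hp]; simp
    simp only [PySem.List.enumerate, List.foldl_cons]
    by_cases hU : r ∈ U
    · -- unrhymed verse
      have hUb : U.contains r = true := by simp [List.contains_eq_mem, hU]
      have hsame : ∀ i ∈ List.range p.length,
          alcVal codes nums U off (p.length + 1) i = alcVal codes nums U off p.length i := by
        intro i hi
        rw [List.mem_range] at hi
        by_cases hv : nums.getD p.length 0 = nums.getD i 0
        · have hiU : nums.getD i 0 ∈ U := by rw [← hv, hk]; exact hU
          rw [alcVal_unr _ _ _ _ _ _ hiU, alcVal_unr _ _ _ _ _ _ hiU]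
        · exact alcVal_succ_of_ne _ _ _ _ _ _ hv
      have hnew : alcVal codes nums U off (p.length + 1) p.length = (-1, "") := by
        rw [alcVal_self, hk]
        simp [hU, List.contains_eq_mem]
      have hstep : alcStepA codes U off
          (letters,
           (List.range p.length).map (fun i => (alcVal codes nums U off p.length i).1),
           (List.range p.length).map (fun i => (alcVal codes nums U off p.length i).2),
           last) ((p.length : Int), r)
          = (letters,
             (List.range (p.length + 1)).map (fun i => (alcVal codes nums U off (p.length + 1) i).1),
             (List.range (p.length + 1)).map (fun i => (alcVal codes nums U off (p.length + 1) i).2),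
             last) := by
        unfold alcStepA
        simp only [hUb, if_true]
        rw [List.range_succ, List.map_append, List.map_append]
        simp only [List.map_cons, List.map_nil, hnew]
        have e1 : (List.range p.length).map (fun i => (alcVal codes nums U off (p.length + 1) i).1)
            = (List.range p.length).map (fun i => (alcVal codes nums U off p.length i).1) :=
          List.map_congr_left (fun i hi => by rw [hsame i hi])
        have e2 : (List.range p.length).map (fun i => (alcVal codes nums U off (p.length + 1) i).2)
            = (List.range p.length).map (fun i => (alcVal codes nums U off p.length i).2) :=
          List.map_congr_left (fun i hi => by rw [hsame i hi])
        rw [e1, e2]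
      rw [hstep]
      have hLet' : LettersInvA U nums (p ++ [r]) letters := by
        have hseq : alcSeen U (p ++ [r]) = alcSeen U p := by
          rw [alcSeen_snoc]; unfold alcSeenStep; simp [hU]
        unfold LettersInvA at *
        rw [hseq]
        exact hLet
      have hLast' : LastInvA U nums last (p ++ [r]).length := by
        simpa using lastInv_extend U nums last p.length hLast (hk ▸ hU)
      have hlen1 : p.length + 1 = (p ++ [r]).length := by simp
      have hcast : ((p.length : Int) + 1) = (((p ++ [r]).length : Nat) : Int) := by simp
      rw [hlen1, hcast]
      exact ih (p ++ [r]) letters last hp2 hLet' hLast'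
    · -- rhymed verse
      have hUb : U.contains r = false := by simp [List.contains_eq_mem, hU]
      -- letters update and the letter value
      have hLet' := lettersInv_update U nums p r letters hU hLet
      have hrmem : r ∈ alcSeen U (p ++ [r]) := by
        rw [alcSeen_snoc]
        unfold alcSeenStep
        rw [hUb]
        simpa using mem_add_self _ r
      have hrl : (if letters.contains r then letters
            else letters.insert r (letters.size : Int)).getD r 0
          = (((PySem.List.index? (alcSeen U nums) r).getD 0 : Nat) : Int) := by
        rw [hLet'.2.2 r hrmem]
        rw [hp2, index_stable U (p ++ [r]) rest r hrmem]
      have hLast' : LastInvA U nums (last.insert r ((p.length : Nat) : Int)) (p ++ [r]).length := by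
        simpa using lastInv_insert U nums last p.length r hLast hk hU
      have hlen1 : p.length + 1 = (p ++ [r]).length := by simp
      have hcast : ((p.length : Int) + 1) = (((p ++ [r]).length : Nat) : Int) := by simp
      have hnewval : alcVal codes nums U off (p.length + 1) p.length
          = ((((PySem.List.index? (alcSeen U nums) r).getD 0 : Nat) : Int), alcLookup codes r) := by
        rw [alcVal_self, hk]
        simp [hU, List.contains_eq_mem]
      cases hl : last.get? r with
      | none =>
        have hcont : last.contains r = false := by
          rw [PySem.Dict.contains_eq_isSome_get?, hl]; rfl
        have hnone_all : ∀ m : Nat, m < p.length → nums.getD m 0 ≠ r := (hLast r hU).2 hl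
        have hsame : ∀ i ∈ List.range p.length,
            alcVal codes nums U off (p.length + 1) i = alcVal codes nums U off p.length i := by
          intro i hi
          rw [List.mem_range] at hi
          by_cases hv : nums.getD p.length 0 = nums.getD i 0
          · exact absurd (by rw [← hv, hk]) (fun he => hnone_all i hi he)
          · exact alcVal_succ_of_ne _ _ _ _ _ _ hv
        have hstep : alcStepA codes U off
            (letters,
             (List.range p.length).map (fun i => (alcVal codes nums U off p.length i).1),
             (List.range p.length).map (fun i => (alcVal codes nums U off p.length i).2),
             last) ((p.length : Int), r)
            = (if letters.contains r then letters else letters.insert r (letters.size : Int),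
               (List.range (p.length + 1)).map (fun i => (alcVal codes nums U off (p.length + 1) i).1),
               (List.range (p.length + 1)).map (fun i => (alcVal codes nums U off (p.length + 1) i).2),
               last.insert r ((p.length : Nat) : Int)) := by
          unfold alcStepA
          simp only [hUb, Bool.false_eq_true, if_false, hcont, Bool.false_and, Bool.and_eq_true,
            Bool.false_eq_true, false_and, if_false]
          rw [List.range_succ, List.map_append, List.map_append]
          simp only [List.map_cons, List.map_nil, hnewval, hrl]
          have e1 : (List.range p.length).map (fun i => (alcVal codes nums U off (p.length + 1) i).1)
              = (List.range p.length).map (fun i => (alcVal codes nums U off p.length i).1) :=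
            List.map_congr_left (fun i hi => by rw [hsame i hi])
          have e2 : (List.range p.length).map (fun i => (alcVal codes nums U off (p.length + 1) i).2)
              = (List.range p.length).map (fun i => (alcVal codes nums U off p.length i).2) :=
            List.map_congr_left (fun i hi => by rw [hsame i hi])
          rw [e1, e2]
        rw [hstep, hlen1, hcast]
        exact ih (p ++ [r]) _ _ hp2 hLet' hLast'
      | some j =>
        obtain ⟨jn, hje, hjk, hjv, hmax⟩ := (hLast r hU).1 j hl
        have hcont : last.contains r = true := by
          rw [PySem.Dict.contains_eq_isSome_get?, hl]; rfl
        have hgetj : last.getD r 0 = (jn : Int) := by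
          rw [PySem.Dict.getD_eq_get?_getD, hl, hje]; rfl
        have hnone : alcNxt nums p.length jn = none := by
          rw [alcNxt_none_iff]
          intro m h1 h2
          rw [hjv]
          exact hmax m h1 h2
        have hsame : ∀ i ∈ List.range p.length, i ≠ jn →
            alcVal codes nums U off (p.length + 1) i = alcVal codes nums U off p.length i := by
          intro i hi hij
          rw [List.mem_range] at hi
          by_cases hv : nums.getD p.length 0 = nums.getD i 0
          · have hir : nums.getD i 0 = r := by rw [← hv, hk]
            have hijn : i < jn := by
              rcases Nat.lt_or_ge i jn with h | h
              · exact h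
              · exact absurd hir (hmax i (by omega) hi)
            exact alcVal_succ_of_some _ _ _ _ _ _
              (alcNxt_isSome nums p.length i jn hijn hjk (by rw [hjv, hir]))
          · exact alcVal_succ_of_ne _ _ _ _ _ _ hv
        have hflip := alcVal_succ_flip codes nums U off p.length jn hjk
          (by rw [hk, hjv]) hnone
        have hold := alcVal_of_none codes nums U off p.length jn hnone
        rw [hjv] at hflip hold
        have hUjb : U.contains r = false := hUb
        by_cases hRes : (off.isSome && decide (((p.length : Nat) : Int) - (jn : Int) > off.getD 0)) = true
        · -- the previous occurrence is reset
          have hflip' : alcVal codes nums U off (p.length + 1) jn = (-1, "") := by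
            rw [hflip]
            simp only [List.contains_eq_mem] at hUjb
            rw [if_neg (by simp [hUjb])]
            rw [if_pos hRes]
          have hstep : alcStepA codes U off
              (letters,
               (List.range p.length).map (fun i => (alcVal codes nums U off p.length i).1),
               (List.range p.length).map (fun i => (alcVal codes nums U off p.length i).2),
               last) ((p.length : Int), r)
              = (if letters.contains r then letters else letters.insert r (letters.size : Int),
                 (List.range (p.length + 1)).map (fun i => (alcVal codes nums U off (p.length + 1) i).1),
                 (List.range (p.length + 1)).map (fun i => (alcVal codes nums U off (p.length + 1) i).2),
                 last.insert r ((p.length : Nat) : Int)) := by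
            unfold alcStepA
            simp only [hUb, Bool.false_eq_true, if_false, hcont, hgetj, Bool.true_and, hRes, if_true]
            rw [List.range_succ, List.map_append, List.map_append]
            simp only [List.map_cons, List.map_nil, hnewval, hrl]
            rw [PySem.List.pySetD_natCast, PySem.List.pySetD_natCast,
              set_map_range _ _ _ _ hjk, set_map_range _ _ _ _ hjk]
            have e1 : (List.range p.length).map (fun i => (alcVal codes nums U off (p.length + 1) i).1)
                = (List.range p.length).map (fun i => if i = jn then (-1 : Int) else (alcVal codes nums U off p.length i).1) := by
              refine List.map_congr_left (fun i hi => ?_)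
              by_cases hij : i = jn
              · subst hij
                rw [hflip', if_pos rfl]
              · rw [hsame i hi hij, if_neg hij]
            have e2 : (List.range p.length).map (fun i => (alcVal codes nums U off (p.length + 1) i).2)
                = (List.range p.length).map (fun i => if i = jn then "" else (alcVal codes nums U off p.length i).2) := by
              refine List.map_congr_left (fun i hi => ?_)
              by_cases hij : i = jn
              · subst hij
                rw [hflip', if_pos rfl]
              · rw [hsame i hi hij, if_neg hij]
            rw [e1, e2]
          rw [hstep, hlen1, hcast]
          exact ih (p ++ [r]) _ _ hp2 hLet' hLast'
        · -- no reset
          have hflip' : alcVal codes nums U off (p.length + 1) jn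
              = alcVal codes nums U off p.length jn := by
            rw [hflip, hold]
            simp only [List.contains_eq_mem] at hUjb
            rw [if_neg (by simp [hUjb]), if_neg hRes, if_neg (by simp [hUjb])]
          have hsame' : ∀ i ∈ List.range p.length,
              alcVal codes nums U off (p.length + 1) i = alcVal codes nums U off p.length i := by
            intro i hi
            by_cases hij : i = jn
            · subst hij; exact hflip'
            · exact hsame i hi hij
          have hstep : alcStepA codes U off
              (letters,
               (List.range p.length).map (fun i => (alcVal codes nums U off p.length i).1),
               (List.range p.length).map (fun i => (alcVal codes nums U off p.length i).2),
               last) ((p.length : Int), r)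
              = (if letters.contains r then letters else letters.insert r (letters.size : Int),
                 (List.range (p.length + 1)).map (fun i => (alcVal codes nums U off (p.length + 1) i).1),
                 (List.range (p.length + 1)).map (fun i => (alcVal codes nums U off (p.length + 1) i).2),
                 last.insert r ((p.length : Nat) : Int)) := by
            unfold alcStepA
            simp only [hUb, Bool.false_eq_true, if_false, hcont, hgetj, Bool.true_and, hRes,
              Bool.false_eq_true, if_false]
            rw [List.range_succ, List.map_append, List.map_append]
            simp only [List.map_cons, List.map_nil, hnewval, hrl]
            have e1 : (List.range p.length).map (fun i => (alcVal codes nums U off (p.length + 1) i).1)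
                = (List.range p.length).map (fun i => (alcVal codes nums U off p.length i).1) :=
              List.map_congr_left (fun i hi => by rw [hsame' i hi])
            have e2 : (List.range p.length).map (fun i => (alcVal codes nums U off (p.length + 1) i).2)
                = (List.range p.length).map (fun i => (alcVal codes nums U off p.length i).2) :=
              List.map_congr_left (fun i hi => by rw [hsame' i hi])
            rw [e1, e2]
          rw [hstep, hlen1, hcast]
          exact ih (p ++ [r]) _ _ hp2 hLet' hLast'

lemma initLettersInv (U nums : List Int) : LettersInvA U nums [] PySem.Dict.empty := by
  refine ⟨?_, ?_, ?_⟩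
  · intro r
    simp [PySem.Dict.contains_empty, alcSeen]
  · simp [PySem.Dict.size_empty, alcSeen]
  · intro r hr
    simp [alcSeen] at hr

lemma initLastInv (U nums : List Int) : LastInvA U nums PySem.Dict.empty 0 := by
  intro r hr
  refine ⟨?_, ?_⟩
  · intro j hj
    simp [PySem.Dict.get?_empty] at hj
  · intro _ m hm
    omega


lemma final_eq (codes : List (Int × String)) (nums U : List Int) (off : Option Int) :
    assign_letter_codes codes nums U off = assign_letter_codes_alt codes nums U off := by
  obtain ⟨l2, d2, hA⟩ := A_loop codes U off nums nums [] PySem.Dict.empty PySem.Dict.empty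
    (by simp) (initLettersInv U nums) (initLastInv U nums)
  have hB := B_loop codes U off nums nums [] (by simp)
  simp only [List.length_nil, Nat.cast_zero, List.range_zero, List.map_nil] at hA hB
  unfold assign_letter_codes assign_letter_codes_alt
  have hseen0 : alcSeen U [] = [] := rfl
  rw [hseen0] at hB
  rw [hA, hB]

-- ===== VERDICT (by name: the statement is the Claim_ definition above) =====
theorem assign_letter_codes_spec : Claim_equal_assign_letter_codes := by
  intro codes code_numbers unrhymed_verses offset _ _
  unfold Spec_assign_letter_codes
  exact final_eq codes code_numbers unrhymed_verses offset
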